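-- pv_equiv track=rewrite | github.com/bbirke/Masterarbeit | Code/BiBEx/BiBEx_Model/app/processing/author_model.py | segment_initials
-- ===== SOURCE A (Python) =====
-- def segment_initials(text: str) -> (str, str):
--     first = None
--     middle = ''
--     first_groups = text.split()
--     for group in first_groups:
--         if "-" not in group:
--             first_punct = group.split(".")
--         else:
--             first_punct = [group]
--         for initial in first_punct:
--             if first is None:
--                 first = initial
--             else:
--                 middle += initial + ' '
--     middle = middle.strip()
--     return first, middle
-- ===== SOURCE B (Python) =====
-- def _flush(parts, buf, hyph):
--     pieces = parts + [buf]
--     return ['.'.join(pieces)] if hyph else pieces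
--
--
-- def segment_initials(text: str) -> (str, str):
--     # single character-level scan: split '.'-pieces eagerly, and if a '-' shows up
--     # in the current token, re-join its pieces with '.' when the token ends
--     flat, parts, buf, hyph, intok = [], [], '', False, False
--     for c in text:
--         if c.isspace():
--             if intok:
--                 flat += _flush(parts, buf, hyph)
--                 parts, buf, hyph, intok = [], '', False, False
--         else:
--             intok = True
--             if c == '.':
--                 parts.append(buf)
--                 buf = ''
--             else:
--                 buf += c
--                 if c == '-':
--                     hyph = True
--     if intok:
--         flat += _flush(parts, buf, hyph)
--     first = flat[0] if flat else None
--     middle = ' '.join(flat[1:]).strip()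
--     return first, middle
-- ===== Notes on version B (the rewrite author's own statement) =====
-- stated objective: alternative
-- what changed: Replaces A's two-level split pipeline (text.split() then per-token split('.') with a first-is-None accumulator) by a single character-level state-machine scan that builds tokens' pieces eagerly, splitting on '.' as it goes and re-joining the pieces with '.' when a '-' is seen in the token, then takes head/join of the resulting flat piece list.
import Mathlib
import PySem

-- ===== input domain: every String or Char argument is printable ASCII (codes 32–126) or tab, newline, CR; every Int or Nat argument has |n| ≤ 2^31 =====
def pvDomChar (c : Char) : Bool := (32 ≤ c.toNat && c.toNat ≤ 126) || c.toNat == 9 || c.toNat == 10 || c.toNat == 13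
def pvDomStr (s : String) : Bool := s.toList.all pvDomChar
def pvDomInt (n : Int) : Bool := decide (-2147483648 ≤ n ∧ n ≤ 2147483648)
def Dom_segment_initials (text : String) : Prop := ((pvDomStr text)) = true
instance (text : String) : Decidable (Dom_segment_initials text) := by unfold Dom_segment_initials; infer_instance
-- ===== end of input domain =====

-- B replaces A's split()-then-split('.') passes by a single character-level scan that splits
-- '.'-pieces eagerly and re-joins them with '.' when a '-' shows up in the token (alternative decomposition).

-- ===== PORT A =====
def segment_initials (text : String) : Option String × String :=
  let first_groups := PySem.Str.split₀ text
  let st := first_groups.foldl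
    (fun (st : Option String × String) group =>
      let first_punct : List String :=
        if PySem.Str.isIn "-" group = false then
          -- group.split("."): exact, separator nonempty
          (PySem.Chars.splitOn group.toList ".".toList).map String.ofList
        else [group]
      first_punct.foldl
        (fun st initial =>
          match st.1 with
          | none => (some initial, st.2)
          | some f => (some f, st.2 ++ initial ++ " ")) st)
    (none, "")
  (st.1, PySem.Str.strip st.2)

-- ===== PORT B =====
-- _flush(parts, buf, hyph): the pieces a finished token contributes
def pvFlushB (parts : List (List Char)) (buf : List Char) (hyph : Bool) : List (List Char) :=
  let pieces := parts ++ [buf]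
  if hyph then [PySem.Chars.join ['.'] pieces] else pieces

-- the for-loop of Source B over the characters, state (flat, parts, buf, hyph, intok)
def pvScanB : List Char → List (List Char) → List (List Char) → List Char → Bool → Bool → List (List Char)
  | [], flat, parts, buf, hyph, intok =>
      if intok then flat ++ pvFlushB parts buf hyph else flat
  | c :: rest, flat, parts, buf, hyph, intok =>
      if PySem.Chars.isspace c then
        if intok then pvScanB rest (flat ++ pvFlushB parts buf hyph) [] [] false false
        else pvScanB rest flat parts buf hyph intok
      else
        if c = '.' then pvScanB rest flat (parts ++ [buf]) [] hyph true
        else pvScanB rest flat parts (buf ++ [c]) (hyph || c == '-') true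

def segment_initials_alt (text : String) : Option String × String :=
  let flat := pvScanB text.toList [] [] [] false false
  let first := (flat.map String.ofList).head?
  let middle := String.ofList (PySem.Chars.strip
    (PySem.Chars.join [' '] (PySem.List.slice flat (some 1) none)))
  (first, middle)

-- ===== PRECONDITION & SPEC =====
def Spec_segment_initials (text : String) (out : Option String × String) : Prop := out = segment_initials_alt text
instance (text : String) (out : Option String × String) : Decidable (Spec_segment_initials text out) := by unfold Spec_segment_initials; infer_instance

-- ===== CLAIM (what is proved, stated in full; the proofs are below) =====
def Claim_equal_segment_initials : Prop := ∀ (text : String), Dom_segment_initials text → Spec_segment_initials text (segment_initials text)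

-- ===== LEMMAS AND PROOFS =====

-- the shared loop step of A, named for the proofs
def pvStep (st : Option String × String) (initial : String) : Option String × String :=
  match st.1 with
  | none => (some initial, st.2)
  | some f => (some f, st.2 ++ initial ++ " ")

def pvDot : List Char → List (List Char)
  | [] => [[]]
  | c :: cs => if c = '.' then [] :: pvDot cs
               else (c :: (pvDot cs).headI) :: (pvDot cs).tail
theorem pvDot_ne_nil (cs : List Char) : pvDot cs ≠ [] := by
  cases cs with
  | nil => simp [pvDot]
  | cons c cs => unfold pvDot; split <;> simp

theorem pvSplitOn_go_spec (fuel : Nat) (l cur : List Char) (acc : List (List Char))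
    (h : l.length < fuel) :
    PySem.Chars.splitOn.go ['.'] fuel l cur acc
      = acc.reverse ++ ((cur.reverse ++ (pvDot l).headI) :: (pvDot l).tail) := by
  induction fuel generalizing l cur acc with
  | zero => omega
  | succ n ih =>
    cases l with
    | nil => simp [PySem.Chars.splitOn.go, pvDot]
    | cons c rest =>
      rw [PySem.Chars.splitOn.go]
      by_cases hc : c = '.'
      · subst hc
        simp only [List.isPrefixOf, BEq.rfl, Bool.and_self, if_pos]
        rw [ih _ _ _ (by simpa using Nat.lt_of_succ_lt_succ h)]
        have := pvDot_ne_nil rest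
        simp [pvDot]
        cases hd : pvDot rest with
        | nil => exact absurd hd this
        | cons a b => simp
      · have : (['.'].isPrefixOf (c :: rest)) = false := by
          simp [List.isPrefixOf]; exact fun h' => hc (by simpa using h'.symm)
        rw [this]
        simp only [Bool.false_eq_true, if_false]
        rw [ih _ _ _ (by simpa using Nat.lt_of_succ_lt_succ h)]
        simp only [pvDot, hc, if_false]
        cases hd : pvDot rest with
        | nil => exact absurd hd (pvDot_ne_nil rest)
        | cons a b => simp

theorem pvSplitOn_dot (tok : List Char) :
    PySem.Chars.splitOn tok ['.'] = pvDot tok := by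
  show PySem.Chars.splitOn.go _ _ _ _ _ = _
  rw [pvSplitOn_go_spec _ _ _ _ (by omega)]
  cases hd : pvDot tok with
  | nil => exact absurd hd (pvDot_ne_nil tok)
  | cons a b => simp

theorem pvDot_snoc_dot (p : List Char) : pvDot (p ++ ['.']) = pvDot p ++ [[]] := by
  induction p with
  | nil => simp [pvDot]
  | cons c cs ih =>
    simp only [List.cons_append, pvDot, ih]
    split
    · simp
    · have := pvDot_ne_nil cs
      cases hd : pvDot cs with
      | nil => exact absurd hd this
      | cons a b => simp

theorem pvDot_snoc (p : List Char) (c : Char) (hc : c ≠ '.') :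
    pvDot (p ++ [c]) = (pvDot p).dropLast ++ [(pvDot p).getLastD [] ++ [c]] := by
  induction p with
  | nil => simp [pvDot, hc]
  | cons d ds ih =>
    simp only [List.cons_append, pvDot, ih]
    split
    · cases hd : pvDot ds with
      | nil => exact absurd hd (pvDot_ne_nil ds)
      | cons a b => cases b <;> simp
    · cases hd : pvDot ds with
      | nil => exact absurd hd (pvDot_ne_nil ds)
      | cons a b => cases b <;> simp

theorem pvJoin_pvDot (cs : List Char) : PySem.Chars.join ['.'] (pvDot cs) = cs := by
  induction cs with
  | nil => rfl
  | cons c cs ih =>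
    unfold pvDot
    split
    · next h =>
      subst h
      cases hd : pvDot cs with
      | nil => exact absurd hd (pvDot_ne_nil cs)
      | cons a b =>
        rw [hd] at ih
        rw [PySem.Chars.join_cons_cons]
        simp [← ih]
    · cases hd : pvDot cs with
      | nil => exact absurd hd (pvDot_ne_nil cs)
      | cons a b =>
        rw [hd] at ih
        cases b with
        | nil => simpa [PySem.Chars.join_singleton] using congrArg (c :: ·) (by simpa [PySem.Chars.join_singleton] using ih)
        | cons x xs =>
          rw [PySem.Chars.join_cons_cons] at ih
          simp only [List.headI_cons, List.tail_cons]
          rw [PySem.Chars.join_cons_cons]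
          simp [← ih]

theorem pvIsIn_dash (l : List Char) :
    PySem.Chars.isIn ['-'] l = decide ('-' ∈ l) := by
  by_cases h : '-' ∈ l
  · simp [h]
    rw [PySem.Chars.isIn_iff_infix]
    exact (List.singleton_infix_iff ..).mpr h
  · simp [h]
    rw [PySem.Chars.isIn_eq_false_iff]
    intro hi
    exact h ((List.singleton_infix_iff ..).mp hi)

def pvPiecesC (tok : List Char) : List (List Char) :=
  if PySem.Chars.isIn ['-'] tok then [tok] else PySem.Chars.splitOn tok ['.']


theorem pvFlush_eq (tok : List Char) (parts : List (List Char)) (buf : List Char) (hyph : Bool)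
    (h1 : parts ++ [buf] = pvDot tok) (h2 : hyph = PySem.Chars.isIn ['-'] tok) :
    pvFlushB parts buf hyph = pvPiecesC tok := by
  unfold pvFlushB pvPiecesC
  simp only [h1, h2, pvSplitOn_dot, pvJoin_pvDot]


theorem pvScan_spec (cs cur : List Char) (acc : List (List Char))
    (flat parts : List (List Char)) (buf : List Char) (hyph intok : Bool)
    (h1 : parts ++ [buf] = pvDot cur.reverse)
    (h2 : hyph = PySem.Chars.isIn ['-'] cur.reverse)
    (h3 : intok = !cur.isEmpty)
    (h4 : flat = acc.reverse.flatMap pvPiecesC) :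
    pvScanB cs flat parts buf hyph intok
      = (PySem.Chars.split₀.go cs cur acc).flatMap pvPiecesC := by
  induction cs generalizing cur acc flat parts buf hyph intok with
  | nil =>
    rw [PySem.Chars.split₀.go]
    cases cur with
    | nil =>
      simp only [List.isEmpty_nil, Bool.not_true] at h3
      simp [pvScanB, h3, h4]
    | cons d ds =>
      simp only [List.isEmpty_cons, Bool.not_false] at h3
      simp only [pvScanB, h3, if_true, List.isEmpty_cons, Bool.false_eq_true, if_false]
      rw [pvFlush_eq _ _ _ _ h1 h2, h4]
      simp
  | cons c rest ih =>
    rw [PySem.Chars.split₀.go]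
    show (if PySem.Chars.isspace c then _ else _) = _
    by_cases hs : PySem.Chars.isspace c
    · rw [if_pos hs, if_pos hs]
      cases cur with
      | nil =>
        simp only [List.isEmpty_nil, Bool.not_true] at h3
        rw [h3]
        simp only [Bool.false_eq_true, if_false]
        exact ih [] acc flat parts buf hyph false h1 h2 rfl h4
      | cons d ds =>
        simp only [List.isEmpty_cons, Bool.not_false] at h3
        rw [h3]
        simp only [if_true, List.isEmpty_cons, Bool.false_eq_true, if_false]
        refine ih [] _ _ [] [] false false rfl rfl rfl ?_
        rw [pvFlush_eq _ _ _ _ h1 h2, h4]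
        simp
    · rw [if_neg hs, if_neg hs]
      by_cases hc : c = '.'
      · rw [if_pos hc]
        refine ih (c :: cur) acc flat (parts ++ [buf]) [] hyph true ?_ ?_ rfl h4
        · subst hc
          simp only [List.reverse_cons, pvDot_snoc_dot, ← h1]
        · rw [h2]
          subst hc
          simp only [List.reverse_cons, pvIsIn_dash]
          simp
      · rw [if_neg hc]
        refine ih (c :: cur) acc flat parts (buf ++ [c]) (hyph || c == '-') true ?_ ?_ rfl h4
        · rw [List.reverse_cons, pvDot_snoc _ _ hc, ← h1]
          simp
        · rw [h2]
          simp only [List.reverse_cons, pvIsIn_dash]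
          by_cases hcd : c = '-'
          · simp [hcd]
          · have hb : (c == '-') = false := by simp [hcd]
            simp [hb, Ne.symm hcd]

theorem pvPieces_ofList (tok : List Char) :
    (if PySem.Str.isIn "-" (String.ofList tok) = false then
        (PySem.Chars.splitOn (String.ofList tok).toList ".".toList).map String.ofList
      else [String.ofList tok]) = (pvPiecesC tok).map String.ofList := by
  unfold pvPiecesC
  simp only [PySem.Str.isIn_eq, String.toList_ofList,
    show "-".toList = ['-'] from rfl, show ".".toList = ['.'] from rfl]
  by_cases h : PySem.Chars.isIn ['-'] tok = true
  · simp [h]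
  · simp only [Bool.not_eq_true] at h
    simp [h]


theorem pvStep_some (xs : List String) (f m : String) :
    xs.foldl pvStep (some f, m) = (some f, xs.foldl (fun m x => m ++ x ++ " ") m) := by
  induction xs generalizing m with
  | nil => rfl
  | cons y ys ih => simpa [pvStep] using ih (m ++ y ++ " ")

theorem pvFold_toList (xs : List String) (m : String) :
    (xs.foldl (fun m x => m ++ x ++ " ") m).toList
      = xs.foldl (fun (m : List Char) (x : String) => m ++ x.toList ++ [' ']) m.toList := by
  induction xs generalizing m with
  | nil => rfl
  | cons y ys ih => simpa using ih (m ++ y ++ " ")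

theorem pvFold_join (xs : List String) (x : String) (m : List Char) :
    (x :: xs).foldl (fun (m : List Char) (x : String) => m ++ x.toList ++ [' ']) m
      = m ++ PySem.Chars.join [' '] ((x :: xs).map String.toList) ++ [' '] := by
  induction xs generalizing x m with
  | nil => simp [PySem.Chars.join_singleton]
  | cons y ys ih =>
      have := ih y (m ++ x.toList ++ [' '])
      simp only [List.foldl_cons] at this ⊢
      rw [this]
      simp only [List.map_cons, PySem.Chars.join_cons_cons]
      simp

theorem pvRstrip_space (cs : List Char) :
    PySem.Chars.rstrip (cs ++ [' ']) = PySem.Chars.rstrip cs := by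
  simp [PySem.Chars.rstrip, List.reverse_append,
    show PySem.Chars.isspace ' ' = true from rfl]

theorem pvStrip_space (cs : List Char) :
    PySem.Chars.strip (cs ++ [' ']) = PySem.Chars.strip cs := by
  unfold PySem.Chars.strip PySem.Chars.lstrip
  rw [List.dropWhile_append]
  split
  · next h =>
      simp only [List.isEmpty_iff] at h
      rw [h]
      rfl
  · exact pvRstrip_space _

-- ===== VERDICT (by name: the statement is the Claim_ definition above) =====
theorem segment_initials_spec : Claim_equal_segment_initials := by
  intro text _
  unfold Spec_segment_initials segment_initials segment_initials_alt
  have hB : pvScanB text.toList [] [] [] false false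
      = (PySem.Chars.split₀ text.toList).flatMap pvPiecesC := by
    rw [PySem.Chars.split₀]
    exact pvScan_spec text.toList [] [] [] [] [] false false rfl rfl rfl rfl
  rw [hB]
  simp only [PySem.Str.split₀]
  rw [List.foldl_map]
  have hinner : ∀ (st : Option String × String) (tok : List Char),
      (let first_punct : List String :=
        if PySem.Str.isIn "-" (String.ofList tok) = false then
          (PySem.Chars.splitOn (String.ofList tok).toList ".".toList).map String.ofList
        else [String.ofList tok]
       first_punct.foldl
        (fun st initial =>
          match st.1 with
          | none => (some initial, st.2)
          | some f => (some f, st.2 ++ initial ++ " ")) st)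
      = ((pvPiecesC tok).map String.ofList).foldl pvStep st := by
    intro st tok
    show (if PySem.Str.isIn "-" (String.ofList tok) = false then
          (PySem.Chars.splitOn (String.ofList tok).toList ".".toList).map String.ofList
        else [String.ofList tok]).foldl pvStep st = _
    rw [pvPieces_ofList]
  simp only [hinner]
  rw [← List.foldl_flatMap]
  rw [← List.map_flatMap]
  generalize (PySem.Chars.split₀ text.toList).flatMap pvPiecesC = flatC
  cases flatC with
  | nil => decide
  | cons f rest =>
      have h1 : PySem.List.slice (f :: rest) (some 1) none = rest := by
        rw [PySem.List.slice_from (f :: rest) (a := 1) (by norm_num)]; rfl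
      rw [h1]
      simp only [List.map_cons, List.foldl_cons,
        show pvStep (none, "") (String.ofList f) = (some (String.ofList f), "") from rfl,
        pvStep_some, List.head?_cons]
      refine Prod.ext rfl ?_
      cases rest with
      | nil =>
          show PySem.Str.strip (List.foldl (fun m x => m ++ x ++ " ") "" [])
              = String.ofList (PySem.Chars.strip (PySem.Chars.join [' '] []))
          decide
      | cons y ys =>
          apply String.toList_inj.mp
          simp only [PySem.Str.toList_strip, String.toList_ofList, pvFold_toList]
          rw [List.map_cons, pvFold_join]
          simp only [String.toList_empty, List.nil_append]
          rw [pvStrip_space]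
          simp [Function.comp_def]
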